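-- pv_equiv track=rewrite | github.com/Joselois1/T2Opti | main.py | crear_matrix
-- ===== SOURCE A (Python) =====
-- def crear_matrix(contenido):
--     matrices = []
--     matrix = []
--     for line in contenido.splitlines():
--         if line != "":
--             # Convert each line into a list of integers and add it to the current matrix
--             matrix.append(list(map(int, line.split())))
--         else:
--             # If the line is empty, add the current matrix to the list of matrices and start a new one
--             matrices.append(matrix)
--             matrix = []
--     # Don't forget to add the last matrix if it's not empty
--     if matrix:
--         matrices.append(matrix)
--     return matrices
-- ===== SOURCE B (Python) =====
-- def crear_matrix(contenido):
--     # Backward pass: partition the lines into blank-line-delimited groups by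
--     # folding from the right, then drop a trailing empty group and parse.
--     groups = [[]]
--     for line in reversed(contenido.splitlines()):
--         if line == "":
--             groups.insert(0, [])
--         else:
--             groups[0].insert(0, line)
--     if groups[-1] == []:
--         groups.pop()
--     return [[[int(t) for t in line.split()] for line in g] for g in groups]
-- ===== Notes on version B (the rewrite author's own statement) =====
-- stated objective: alternative
-- what changed: A streams forward with a (matrices, current-matrix) accumulator and a trailing non-empty guard; B builds the blank-line-delimited partition of the line list by a backward (right-fold) pass, drops the trailing group only if it is empty, and parses every group afterwards with a nested comprehension (partitioning separated from parsing).
import Mathlib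
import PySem

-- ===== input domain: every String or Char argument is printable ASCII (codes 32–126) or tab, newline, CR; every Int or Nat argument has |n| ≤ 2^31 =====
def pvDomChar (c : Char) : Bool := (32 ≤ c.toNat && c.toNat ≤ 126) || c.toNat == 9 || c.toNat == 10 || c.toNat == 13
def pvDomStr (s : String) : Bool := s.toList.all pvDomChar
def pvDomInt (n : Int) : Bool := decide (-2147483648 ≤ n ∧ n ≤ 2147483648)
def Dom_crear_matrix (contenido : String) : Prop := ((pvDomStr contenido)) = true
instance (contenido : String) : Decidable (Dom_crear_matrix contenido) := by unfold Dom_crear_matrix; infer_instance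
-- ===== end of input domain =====

-- B partitions the line list into blank-line-delimited groups by a backward (right-fold)
-- pass and parses afterwards, instead of A's forward accumulator loop (objective: alternative).


-- shared primitive: list(map(int, line.split())) (int(t) is total here thanks to Pre_; getD 0 is never hit inside Pre_)
def pyRow (line : String) : List Int :=
  (PySem.Str.split₀ line).map (fun t => (PySem.Int.ofStr? t).getD 0)

-- ===== PORT A =====
def crear_matrix (contenido : String) : List (List (List Int)) :=
  let st := (PySem.Str.splitlines contenido).foldl
    (fun (s : List (List (List Int)) × List (List Int)) line =>
      if line ≠ "" then (s.1, s.2 ++ [pyRow line]) else (s.1 ++ [s.2], []))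
    ([], [])
  if st.2 ≠ [] then st.1 ++ [st.2] else st.1

-- ===== PORT B =====
-- Source B's backward pass (for line in reversed(lines): insert at the front) is a right fold
def bSplit (lines : List String) : List (List String) :=
  lines.foldr
    (fun line gs =>
      if line = "" then [] :: gs
      else match gs with
        | [] => [[line]]      -- unreachable: the initial state [[]] is nonempty
        | g :: gs' => (line :: g) :: gs')
    [[]]

def crear_matrix_alt (contenido : String) : List (List (List Int)) :=
  let groups := bSplit (PySem.Str.splitlines contenido)
  let groups := if groups.getLast? = some [] then groups.dropLast else groups
  groups.map (fun g => g.map pyRow)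

-- ===== PRECONDITION & SPEC =====
-- Pre_ excludes exactly the inputs where Python's int(t) raises ValueError on some
-- whitespace-separated token of a line (A raises there; B raises there too).
def Pre_crear_matrix (contenido : String) : Prop :=
  ∀ line ∈ PySem.Str.splitlines contenido,
    ∀ t ∈ PySem.Str.split₀ line, (PySem.Int.ofStr? t).isSome
instance (contenido : String) : Decidable (Pre_crear_matrix contenido) := by
  unfold Pre_crear_matrix; infer_instance

def pvWitness_crear_matrix : String := "1 2\n3 4\n\n5 6"

def Spec_crear_matrix (contenido : String) (out : List (List (List Int))) : Prop := out = crear_matrix_alt contenido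
instance (contenido : String) (out : List (List (List Int))) : Decidable (Spec_crear_matrix contenido out) := by unfold Spec_crear_matrix; infer_instance

-- ===== CLAIM (what is proved, stated in full; the proofs are below) =====
def Claim_equal_crear_matrix : Prop := ∀ (contenido : String), Dom_crear_matrix contenido → Pre_crear_matrix contenido → Spec_crear_matrix contenido (crear_matrix contenido)

-- ===== LEMMAS AND PROOFS =====

-- proof-only helper: the parsed partition of the lines, as (closed groups, current group)
def splitP : List String → List (List (List Int)) × List (List Int)
  | [] => ([], [])
  | l :: rest =>
    let p := splitP rest
    if l = "" then ([] :: p.1, p.2)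
    else match p.1 with
      | [] => ([], pyRow l :: p.2)
      | g :: gs' => ((pyRow l :: g) :: gs', p.2)

lemma foldA_eq_splitP (lines : List String)
    (ms0 : List (List (List Int))) (m0 : List (List Int)) :
    lines.foldl
      (fun (s : List (List (List Int)) × List (List Int)) line =>
        if line ≠ "" then (s.1, s.2 ++ [pyRow line]) else (s.1 ++ [s.2], []))
      (ms0, m0) =
    match splitP lines with
    | ([], cur) => (ms0, m0 ++ cur)
    | (g :: gs, cur) => (ms0 ++ (m0 ++ g) :: gs, cur) := by
  induction lines generalizing ms0 m0 with
  | nil => simp [splitP]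
  | cons l rest ih =>
    rcases h : splitP rest with ⟨gs, cur⟩
    by_cases hl : l = ""
    · subst hl
      simp only [List.foldl_cons, if_neg (not_not_intro rfl)]
      rw [ih, h]
      simp only [splitP]
      cases gs <;> simp_all
    · simp only [List.foldl_cons, if_pos hl]
      rw [ih, h]
      simp only [splitP, if_neg hl]
      cases gs <;> simp_all

lemma bSplit_ne_nil (lines : List String) : bSplit lines ≠ [] := by
  induction lines with
  | nil => simp [bSplit]
  | cons l rest ih =>
    simp only [bSplit, List.foldr_cons] at *
    split
    · simp
    · cases h : (rest.foldr _ [[]]) with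
      | nil => simp
      | cons g gs => simp

lemma bSplit_map_eq_splitP (lines : List String) :
    (bSplit lines).map (fun g => g.map pyRow) = (splitP lines).1 ++ [(splitP lines).2] := by
  induction lines with
  | nil => simp [bSplit, splitP]
  | cons l rest ih =>
    by_cases hl : l = ""
    · subst hl
      simp only [bSplit, List.foldr_cons, splitP] at *
      simpa using ih
    · have hne := bSplit_ne_nil rest
      rcases hb : bSplit rest with _ | ⟨g, gs⟩
      · exact absurd hb hne
      · simp only [bSplit, List.foldr_cons, if_neg hl, splitP] at *
        rw [hb] at ih ⊢
        rcases h : splitP rest with ⟨ps, cur⟩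
        rw [h] at ih
        cases ps with
        | nil =>
          simp only [List.nil_append] at ih
          have h1 : g.map pyRow = cur := by
            have := List.head_eq_of_cons_eq ih; simpa using this
          have h2 : gs = [] := by
            have := List.tail_eq_of_cons_eq ih
            simpa using List.map_eq_nil_iff.mp this
          simp [h2, h1]
        | cons g' gs' =>
          have h1 : g.map pyRow = g' := List.head_eq_of_cons_eq ih
          have h2 : gs.map (fun g => g.map pyRow) = gs' ++ [cur] :=
            List.tail_eq_of_cons_eq ih
          simp [h1, h2]

lemma getLast?_bSplit_empty_iff (lines : List String) :
    (bSplit lines).getLast? = some [] ↔ (splitP lines).2 = [] := by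
  have hne := bSplit_ne_nil lines
  have hmap := bSplit_map_eq_splitP lines
  have hlast : ((bSplit lines).map (fun g => g.map pyRow)).getLast? = some ((splitP lines).2) := by
    rw [hmap]; simp
  rw [List.getLast?_map] at hlast
  rcases hg : (bSplit lines).getLast? with _ | g
  · simp [hg] at hlast
  · simp only [hg, Option.map_some] at hlast
    have hgp : g.map pyRow = (splitP lines).2 := by injection hlast
    constructor
    · intro h
      have : g = [] := by injection h
      simp [← hgp, this]
    · intro h
      rw [h] at hgp
      have : g = [] := List.map_eq_nil_iff.mp hgp
      simp [this]

lemma A_eq_B (lines : List String) :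
    (let st := lines.foldl
        (fun (s : List (List (List Int)) × List (List Int)) line =>
          if line ≠ "" then (s.1, s.2 ++ [pyRow line]) else (s.1 ++ [s.2], []))
        ([], []);
     if st.2 ≠ [] then st.1 ++ [st.2] else st.1) =
    (let groups := bSplit lines;
     (if groups.getLast? = some [] then groups.dropLast else groups).map
       (fun g => g.map pyRow)) := by
  rcases h : splitP lines with ⟨gs, cur⟩
  rcases hb : bSplit lines with _ | ⟨g0, grest⟩
  · exact absurd hb (bSplit_ne_nil lines)
  have hmap := bSplit_map_eq_splitP lines
  have hiff := getLast?_bSplit_empty_iff lines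
  rw [h, hb] at hmap hiff
  simp only at hmap hiff
  simp only [foldA_eq_splitP, h]
  by_cases hc : cur = []
  · rw [if_pos (hiff.mpr hc)]
    have hdrop : ((g0 :: grest).dropLast).map (fun g => g.map pyRow) = gs := by
      rw [List.map_dropLast, hmap, List.dropLast_concat]
    rw [hdrop]
    cases gs <;> simp [hc]
  · rw [if_neg (fun hgl => hc (hiff.mp hgl)), hmap]
    cases gs <;> simp [hc]

-- ===== VERDICT (by name: the statement is the Claim_ definition above) =====
theorem crear_matrix_spec : Claim_equal_crear_matrix := by
  intro contenido _ _
  unfold Spec_crear_matrix crear_matrix crear_matrix_alt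
  exact (A_eq_B (PySem.Str.splitlines contenido)).symm ▸ rfl
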